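-- pv_equiv track=rewrite | github.com/Micah-L/Steganography | steg.py | num_to_binary_array
-- ===== SOURCE A (Python) =====
-- def num_to_binary_array(num, min_length = 8):
--     arr = []
--     while num > 0:
--         arr.append(num % 2)
--         num >>= 1
--     while len(arr) < min_length:
--         arr.append(0)
--     arr.reverse()
--     return arr
-- ===== SOURCE B (Python) =====
-- def num_to_binary_array(num, min_length = 8):
--     m = num if num > 0 else 0
--     length = max(m.bit_length(), min_length)
--     return [(m >> i) & 1 for i in reversed(range(length))]
-- ===== Notes on version B (the rewrite author's own statement) =====
-- stated objective: simpler
-- what changed: B computes the output length up front from bit_length and emits the bits most-significant-first in a single list comprehension, instead of A's append-LSB-first loop, zero-padding loop and final in-place reverse.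
import Mathlib
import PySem

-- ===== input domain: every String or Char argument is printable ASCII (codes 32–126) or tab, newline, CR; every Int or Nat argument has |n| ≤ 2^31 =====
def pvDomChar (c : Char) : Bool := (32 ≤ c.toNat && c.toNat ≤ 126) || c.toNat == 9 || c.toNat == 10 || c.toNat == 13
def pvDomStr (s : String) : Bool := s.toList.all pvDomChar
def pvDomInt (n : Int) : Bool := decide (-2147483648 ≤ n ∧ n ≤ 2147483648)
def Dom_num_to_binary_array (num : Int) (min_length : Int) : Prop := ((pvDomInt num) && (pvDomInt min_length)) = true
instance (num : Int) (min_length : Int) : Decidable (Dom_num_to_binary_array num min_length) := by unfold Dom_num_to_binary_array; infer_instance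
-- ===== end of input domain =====

-- B computes the output length up front from bit_length and emits the bits
-- most-significant-first in one pass; A appends LSB-first, pads, then reverses.
-- Objective: simpler (no accumulate-then-reverse).

-- ===== PORT A =====
-- 'while num > 0: arr.append(num % 2); num >>= 1' (bits produced LSB-first)
def pvBitsA (num : Int) : List Int :=
  if h : num > 0 then num % 2 :: pvBitsA (num / 2) else []
termination_by num.toNat
decreasing_by omega

-- 'while len(arr) < min_length: arr.append(0)'
def pvPadA (arr : List Int) (min_length : Int) : List Int :=
  if (arr.length : Int) < min_length then pvPadA (arr ++ [0]) min_length else arr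
termination_by (min_length - arr.length).toNat
decreasing_by simp; omega

def num_to_binary_array (num : Int) (min_length : Int) : List Int :=
  (pvPadA (pvBitsA num) min_length).reverse

-- ===== PORT B =====
-- Python int.bit_length for a nonnegative argument (m = 0 gives 0)
def pvBitLen (m : Int) : Nat :=
  if h : m ≤ 0 then 0 else 1 + pvBitLen (m / 2)
termination_by m.toNat
decreasing_by omega

def num_to_binary_array_alt (num : Int) (min_length : Int) : List Int :=
  let m : Int := if num > 0 then num else 0
  let length : Int := max (pvBitLen m : Int) min_length
  ((List.range length.toNat).reverse).map (fun i => (m / 2 ^ i) % 2)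

-- ===== PRECONDITION & SPEC =====
def Spec_num_to_binary_array (num : Int) (min_length : Int) (out : List Int) : Prop := out = num_to_binary_array_alt num min_length
instance (num : Int) (min_length : Int) (out : List Int) : Decidable (Spec_num_to_binary_array num min_length out) := by unfold Spec_num_to_binary_array; infer_instance

-- ===== CLAIM (what is proved, stated in full; the proofs are below) =====
def Claim_equal_num_to_binary_array : Prop := ∀ (num : Int) (min_length : Int), Dom_num_to_binary_array num min_length → Spec_num_to_binary_array num min_length (num_to_binary_array num min_length)

-- ===== LEMMAS AND PROOFS =====

-- A's bit loop produces exactly the first bitLen bits, LSB first.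
theorem pvBitsA_eq (num : Int) :
    pvBitsA num = (List.range (pvBitLen num)).map (fun i => (num / 2 ^ i) % 2) := by
  fun_induction pvBitsA num with
  | case1 n h ih =>
    rw [pvBitLen]
    simp only [show ¬ n ≤ 0 by omega, dif_neg, not_false_iff]
    rw [add_comm, List.range_succ_eq_map, List.map_cons, List.map_map]
    congr 1
    · norm_num
    · rw [ih]
      apply List.map_congr_left
      intro i _
      simp only [Function.comp_apply]
      rw [show n / 2 ^ (i+1) = (n / 2) / 2 ^ i by
        rw [Int.ediv_ediv_of_nonneg (by norm_num : (0:Int) ≤ 2), pow_succ']]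
  | case2 n h =>
    rw [pvBitLen]
    simp only [show n ≤ 0 by omega, dif_pos]
    simp

theorem pvPadA_eq (arr : List Int) (L : Int) :
    pvPadA arr L = arr ++ List.replicate (L - arr.length).toNat 0 := by
  fun_induction pvPadA arr L with
  | case1 arr h ih =>
    rw [ih, List.append_assoc]
    congr 1
    have hL : (L - arr.length).toNat = (L - (arr ++ [0]).length).toNat + 1 := by
      simp at h ⊢; omega
    rw [hL]
    simp [List.replicate_succ]
  | case2 arr h =>
    have : (L - arr.length).toNat = 0 := by simp at h; omega
    simp [this]

theorem pvBitLen_lt (m : Int) (hm : 0 ≤ m) : m < 2 ^ pvBitLen m := by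
  fun_induction pvBitLen m with
  | case1 m h => simpa using by omega
  | case2 m h ih =>
    have := ih (Int.ediv_nonneg (by omega) (by norm_num))
    rw [add_comm, pow_succ]
    omega

theorem high_bit_zero (m : Int) (hm : 0 ≤ m) (i : Nat) (hi : pvBitLen m ≤ i) :
    (m / 2 ^ i) % 2 = 0 := by
  have h1 : m < 2 ^ i := lt_of_lt_of_le (pvBitLen_lt m hm)
    (by exact_mod_cast pow_le_pow_right₀ (by norm_num : (1:Int) ≤ 2) hi)
  rw [Int.ediv_eq_zero_of_lt hm h1]
  norm_num

theorem num_to_binary_array_eq (num min_length : Int) :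
    num_to_binary_array num min_length = num_to_binary_array_alt num min_length := by
  unfold num_to_binary_array num_to_binary_array_alt
  set m : Int := if num > 0 then num else 0 with hm
  have hm0 : 0 ≤ m := by rw [hm]; split <;> omega
  have hbits : pvBitsA num = (List.range (pvBitLen m)).map (fun i => (m / 2 ^ i) % 2) := by
    rw [hm]
    split
    · exact pvBitsA_eq num
    · rw [pvBitsA, dif_neg (by omega), pvBitLen, dif_pos le_rfl]; simp
  set k := pvBitLen m with hk
  set p := (min_length - k).toNat with hp
  have hlen : (max (k : Int) min_length).toNat = k + p := by omega
  rw [hbits, pvPadA_eq]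
  simp only [List.length_map, List.length_range, ← hk, ← hp, hlen]
  rw [List.range_add, List.reverse_append, List.map_reverse, List.map_append,
      List.reverse_append, List.map_map]
  congr 1
  have hz : List.map ((fun i => m / 2 ^ i % 2) ∘ (fun x => k + x)) (List.range p)
      = List.replicate p 0 := by
    rw [List.eq_replicate_iff]
    refine ⟨by simp, ?_⟩
    intro b hb
    simp only [List.mem_map, Function.comp_apply] at hb
    obtain ⟨i, _, hb⟩ := hb
    rw [← hb, high_bit_zero m hm0 (k + i) (by omega)]
  rw [hz, List.reverse_replicate]

-- ===== VERDICT (by name: the statement is the Claim_ definition above) =====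
theorem num_to_binary_array_spec : Claim_equal_num_to_binary_array := by
  intro num min_length _
  unfold Spec_num_to_binary_array
  exact num_to_binary_array_eq num min_length
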